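-- pv_equiv track=rewrite | github.com/youngseo9603/coding_test | 프로그래머스/lv2/42626. 더 맵게/더 맵게.py | solution
-- ===== SOURCE A (Python) =====
-- from heapq import heappush, heappop, heapify
--
-- def solution(scoville, K):
--     answer = 0
--
--     heapify(scoville)
--
--     while(scoville[0] < K):
--
--         a = heappop(scoville)
--         b = heappop(scoville)
--
--         heappush(scoville, a + 2*b)
--         answer += 1
--
--         if len(scoville) == 1 and scoville[0] < K:
--             answer = -1
--             break
--
--     return answer
-- ===== SOURCE B (Python) =====
-- # B: two-queue merge instead of a heap. Sort once into a FIFO 'base'; produced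
-- # combinations go, in order, into a second FIFO 'made' (they come out nondecreasing),
-- # so each minimum is read off the two queue fronts in O(1) -- no heap sifts, no
-- # insertions into a sorted structure. Note: A mutates scoville in place (heapify/pops);
-- # B leaves the argument untouched -- equivalence is about the return value.
-- from collections import deque
--
-- def solution(scoville, K):
--     base = deque(sorted(scoville))
--     made = deque()
--
--     def front():
--         if not base:
--             return made[0]
--         if not made:
--             return base[0]
--         return base[0] if base[0] <= made[0] else made[0]
--
--     def pop_min():
--         if not base:
--             return made.popleft()
--         if not made:
--             return base.popleft()
--         return base.popleft() if base[0] <= made[0] else made.popleft()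
--
--     answer = 0
--     while front() < K:
--         a = pop_min()
--         b = pop_min()
--         made.append(a + 2 * b)
--         answer += 1
--         if len(base) + len(made) == 1 and front() < K:
--             return -1
--     return answer
-- ===== Notes on version B (the rewrite author's own statement) =====
-- stated objective: faster
-- what changed: Replaces the binary heap with a two-queue merge: sort once into a FIFO, append each combined value to a second FIFO (produced values come out nondecreasing), and take every minimum from the two queue fronts in O(1), so no heap sift or ordered insertion remains.
import Mathlib
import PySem

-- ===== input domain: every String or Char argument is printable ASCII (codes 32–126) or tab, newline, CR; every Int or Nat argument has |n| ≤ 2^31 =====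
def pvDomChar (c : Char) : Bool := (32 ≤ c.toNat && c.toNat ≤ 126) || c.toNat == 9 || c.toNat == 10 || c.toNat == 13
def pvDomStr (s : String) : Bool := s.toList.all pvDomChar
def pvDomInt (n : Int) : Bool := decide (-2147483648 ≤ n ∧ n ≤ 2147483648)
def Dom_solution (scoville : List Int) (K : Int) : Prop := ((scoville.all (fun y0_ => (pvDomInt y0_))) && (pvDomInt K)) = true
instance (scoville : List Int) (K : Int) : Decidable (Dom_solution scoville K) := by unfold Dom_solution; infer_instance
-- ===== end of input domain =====

-- B replaces A's binary heap by a two-queue merge: sort once into a FIFO 'base', push each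
-- combined value onto a second FIFO 'made', and read every minimum off the two queue fronts.
-- Equivalence is about the RETURN value only (A mutates scoville in place via heapify/heappop,
-- B does not).

-- ===== PORT A =====
-- heappop ported by heapq's contract: return the heap minimum and the heap without one
-- occurrence of it (exact for Int elements, where the answer depends only on the multiset);
-- heapify is a no-op under this view and scoville[0] is the heap minimum.
def heapPopA (s : List Int) : Option (Int × List Int) :=
  match PySem.List.min? s (fun x => x) with
  | none => none
  | some m =>
    match PySem.List.remove? s m with
    | none => none
    | some r => some (m, r)

-- while scoville[0] < K: …  (fuel = length+1 is enough: each iteration shrinks the list by 1;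
-- the 0-returns mark states where the Python raises IndexError, excluded by Pre_solution)
def loopA (K : Int) : Nat → List Int → Int → Int
  | 0, _, answer => answer
  | n + 1, s, answer =>
    match PySem.List.min? s (fun x => x) with
    | none => 0          -- scoville[0] on empty list: IndexError
    | some m =>
      if m < K then
        match heapPopA s with
        | none => 0
        | some (a, s1) =>
          match heapPopA s1 with
          | none => 0    -- heappop on empty heap: IndexError
          | some (b, s2) =>
            let s3 := s2 ++ [a + 2 * b]        -- heappush (multiset view)
            if s3.length = 1 ∧ (PySem.List.min? s3 (fun x => x)).getD 0 < K then
              -1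
            else
              loopA K n s3 (answer + 1)
      else answer

def solution (scoville : List Int) (K : Int) : Int :=
  loopA K (scoville.length + 1) scoville 0

-- ===== PORT B =====
-- front(): peek the smaller of the two queue fronts (IndexError on two empty queues = none)
def frontB : List Int → List Int → Option Int
  | [], [] => none
  | [], m :: _ => some m
  | b :: _, [] => some b
  | b :: _, m :: _ => some (if b ≤ m then b else m)

-- pop_min(): pop from whichever queue has the smaller front (base on ties)
def popB : List Int → List Int → Option (Int × List Int × List Int)
  | [], [] => none
  | [], m :: ms => some (m, [], ms)
  | b :: bs, [] => some (b, bs, [])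
  | b :: bs, m :: ms => if b ≤ m then some (b, bs, m :: ms) else some (m, b :: bs, ms)

def loopB (K : Int) : Nat → List Int → List Int → Int → Int
  | 0, _, _, answer => answer
  | n + 1, base, made, answer =>
    match frontB base made with
    | none => 0          -- front() on two empty queues: IndexError
    | some f =>
      if f < K then
        match popB base made with
        | none => 0
        | some (a, b1, m1) =>
          match popB b1 m1 with
          | none => 0    -- pop_min() on emptied queues: IndexError
          | some (b, b2, m2) =>
            let m3 := m2 ++ [a + 2 * b]       -- made.append(a + 2*b)
            if b2.length + m3.length = 1 ∧ (frontB b2 m3).getD 0 < K then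
              -1
            else
              loopB K n b2 m3 (answer + 1)
      else answer

def solution_alt (scoville : List Int) (K : Int) : Int :=
  loopB K (scoville.length + 1) (PySem.List.sorted scoville (fun x => x)) [] 0

-- ===== PRECONDITION & SPEC =====
-- Pre_ excludes exactly the inputs on which A raises IndexError: the empty list, and a
-- one-element list whose only value is below K (heappop of the emptied heap).
def Pre_solution (scoville : List Int) (K : Int) : Prop :=
  scoville ≠ [] ∧ ¬(scoville.length = 1 ∧ scoville.headI < K)
instance (scoville : List Int) (K : Int) : Decidable (Pre_solution scoville K) := by unfold Pre_solution; infer_instance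
def pvWitness_solution : List Int × Int := ([1, 2, 3, 9, 10, 12], 7)

def Spec_solution (scoville : List Int) (K : Int) (out : Int) : Prop := out = solution_alt scoville K
instance (scoville : List Int) (K : Int) (out : Int) : Decidable (Spec_solution scoville K out) := by unfold Spec_solution; infer_instance

-- ===== CLAIM (what is proved, stated in full; the proofs are below) =====
def Claim_equal_solution : Prop := ∀ (scoville : List Int) (K : Int), Dom_solution scoville K → Pre_solution scoville K → Spec_solution scoville K (solution scoville K)

-- ===== LEMMAS AND PROOFS =====

-- the loop invariant that makes the 'made' queue behave as a sorted structure: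
-- both queues sorted, every made value ≤ 3·(any base value), and within 'made'
-- every later value ≤ 3·(any earlier value)
def InvB (base made : List Int) : Prop :=
  base.Pairwise (· ≤ ·) ∧ made.Pairwise (· ≤ ·) ∧
  (∀ m ∈ made, ∀ x ∈ base, m ≤ 3 * x) ∧
  made.Pairwise (fun i j => j ≤ 3 * i)

theorem min?_eq_of_least (s : List Int) (m : Int) (hm : m ∈ s) (hle : ∀ z ∈ s, m ≤ z) :
    PySem.List.min? s (fun v => v) = some m := by
  cases h : PySem.List.min? s (fun v => v) with
  | none =>
    rw [PySem.List.min?_eq_none_iff] at h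
    subst h; simp at hm
  | some m' =>
    have h1 : m' ≤ m := PySem.List.min?_isMin h m hm
    have h2 : m ≤ m' := hle m' (PySem.List.min?_mem h)
    rw [le_antisymm h1 h2]

theorem heapPopA_eq' (pool : List Int) (a : Int) (rest : List Int)
    (hp : pool.Perm (a :: rest)) (hle : ∀ z ∈ pool, a ≤ z) :
    heapPopA pool = some (a, pool.erase a) ∧ (pool.erase a).Perm rest := by
  have hmem : a ∈ pool := hp.mem_iff.2 List.mem_cons_self
  constructor
  · unfold heapPopA
    simp only [min?_eq_of_least pool a hmem hle, PySem.List.remove?_eq_some_erase _ _ hmem]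
  · have := hp.erase a
    simpa using this

theorem popB_spec (base made : List Int) (hb : base.Pairwise (· ≤ ·))
    (hm : made.Pairwise (· ≤ ·)) (a : Int) (b1 m1 : List Int)
    (h : popB base made = some (a, b1, m1)) :
    frontB base made = some a ∧
    (∀ z ∈ base ++ made, a ≤ z) ∧
    (base ++ made).Perm (a :: (b1 ++ m1)) ∧
    ((base = a :: b1 ∧ m1 = made) ∨ (b1 = base ∧ made = a :: m1)) := by
  match base, made with
  | [], [] => simp [popB] at h
  | [], m :: ms =>
    simp [popB] at h
    obtain ⟨rfl, rfl, rfl⟩ := h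
    refine ⟨rfl, ?_, by simp, Or.inr ⟨rfl, rfl⟩⟩
    intro z hz
    simp at hz
    rcases hz with rfl | hz
    · exact le_refl _
    · exact (List.pairwise_cons.1 hm).1 z hz
  | b :: bs, [] =>
    simp [popB] at h
    obtain ⟨rfl, rfl, rfl⟩ := h
    refine ⟨rfl, ?_, by simp, Or.inl ⟨rfl, rfl⟩⟩
    intro z hz
    simp at hz
    rcases hz with rfl | hz
    · exact le_refl _
    · exact (List.pairwise_cons.1 hb).1 z hz
  | b :: bs, m :: ms =>
    by_cases hbm : b ≤ m
    · simp [popB, hbm] at h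
      obtain ⟨rfl, rfl, rfl⟩ := h
      refine ⟨by simp [frontB, hbm], ?_, by simp, Or.inl ⟨rfl, rfl⟩⟩
      intro z hz
      simp at hz
      rcases hz with rfl | hz | rfl | hz
      · exact le_refl _
      · exact (List.pairwise_cons.1 hb).1 z hz
      · exact hbm
      · exact le_trans hbm ((List.pairwise_cons.1 hm).1 z hz)
    · simp [popB, hbm] at h
      obtain ⟨rfl, rfl, rfl⟩ := h
      have hmb : m ≤ b := le_of_lt (lt_of_not_ge hbm)
      refine ⟨by simp [frontB, hbm], ?_, ?_, Or.inr ⟨rfl, rfl⟩⟩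
      · intro z hz
        simp at hz
        rcases hz with rfl | hz | rfl | hz
        · exact hmb
        · exact le_trans hmb ((List.pairwise_cons.1 hb).1 z hz)
        · exact le_refl _
        · exact (List.pairwise_cons.1 hm).1 z hz
      · simpa using (List.perm_middle (a := m) (l₁ := b :: bs) (l₂ := ms)).symm.symm

theorem frontB_none_iff (base made : List Int) :
    frontB base made = none ↔ base = [] ∧ made = [] := by
  match base, made with
  | [], [] => simp [frontB]
  | [], m :: ms => simp [frontB]
  | b :: bs, [] => simp [frontB]
  | b :: bs, m :: ms => simp [frontB]

theorem loops_eq (K : Int) (n : Nat) :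
    ∀ (pool base made : List Int) (ans : Int),
      pool.Perm (base ++ made) → InvB base made →
      loopA K n pool ans = loopB K n base made ans := by
  induction n with
  | zero => intro pool base made ans _ _; rfl
  | succ n ih =>
    intro pool base made ans hp hI
    obtain ⟨hbS, hmS, hCross, h3⟩ := hI
    cases hf : frontB base made with
    | none =>
      obtain ⟨rfl, rfl⟩ := (frontB_none_iff _ _).1 hf
      have : pool = [] := by simpa using hp.eq_nil
      subst this
      simp [loopA, loopB, PySem.List.min?, hf]
    | some f =>
      -- front is defined, so popB succeeds
      cases hpop : popB base made with
      | none =>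
        exfalso
        match base, made with
        | [], [] => simp [frontB] at hf
        | [], m :: ms => simp [popB] at hpop
        | b :: bs, [] => simp [popB] at hpop
        | b :: bs, m :: ms => by_cases hbm : b ≤ m <;> simp [popB, hbm] at hpop
      | some r =>
        obtain ⟨a, b1, m1⟩ := r
        obtain ⟨hfa, hleast, hperm1, hcases⟩ := popB_spec base made hbS hmS a b1 m1 hpop
        have ha : f = a := by rw [hfa] at hf; exact (Option.some_inj.1 hf).symm
        subst ha
        have hminA : PySem.List.min? pool (fun v => v) = some f :=
          min?_eq_of_least pool f (hp.mem_iff.2 (hperm1.mem_iff.2 List.mem_cons_self))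
            (fun z hz => hleast z (hp.mem_iff.1 hz))
        simp only [loopA, loopB, hminA, hf, hpop]
        by_cases hfK : f < K
        · simp only [if_pos hfK]
          -- first pop on the A side
          have hpA := heapPopA_eq' pool f (b1 ++ m1) (hp.trans hperm1)
            (fun z hz => hleast z (hp.mem_iff.1 hz))
          simp only [hpA.1]
          have hperm1' : (pool.erase f).Perm (b1 ++ m1) := hpA.2
          -- sortedness of the remainders
          have hb1S : b1.Pairwise (· ≤ ·) := by
            rcases hcases with ⟨hbe, _⟩ | ⟨rfl, _⟩
            · rw [hbe] at hbS; exact (List.pairwise_cons.1 hbS).2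
            · exact hbS
          have hm1S : m1.Pairwise (· ≤ ·) := by
            rcases hcases with ⟨_, rfl⟩ | ⟨_, hme⟩
            · exact hmS
            · rw [hme] at hmS; exact (List.pairwise_cons.1 hmS).2
          cases hpop2 : popB b1 m1 with
          | none =>
            -- both queues empty after the first pop: A's second heappop raises too
            have hnil : b1 = [] ∧ m1 = [] := by
              match b1, m1 with
              | [], [] => exact ⟨rfl, rfl⟩
              | [], m :: ms => simp [popB] at hpop2
              | b :: bs, [] => simp [popB] at hpop2
              | b :: bs, m :: ms => by_cases hbm : b ≤ m <;> simp [popB, hbm] at hpop2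
            obtain ⟨rfl, rfl⟩ := hnil
            have he : pool.erase f = [] := by simpa using hperm1'.eq_nil
            simp [heapPopA, he, PySem.List.min?]
          | some r2 =>
            obtain ⟨b, b2, m2⟩ := r2
            obtain ⟨_, hleast2, hperm2, hcases2⟩ := popB_spec b1 m1 hb1S hm1S b b2 m2 hpop2
            have hpA2 := heapPopA_eq' (pool.erase f) b (b2 ++ m2) (hperm1'.trans hperm2)
              (fun z hz => hleast2 z (hperm1'.mem_iff.1 hz))
            simp only [hpA2.1]
            set v := f + 2 * b with hv
            set s3 := ((pool.erase f).erase b) ++ [v] with hs3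
            set m3 := m2 ++ [v] with hm3
            -- the multiset correspondence of the next states
            have hperm3 : s3.Perm (b2 ++ m3) := by
              have h1 : (((pool.erase f).erase b) ++ [v]).Perm ((b2 ++ m2) ++ [v]) :=
                hpA2.2.append_right [v]
              simpa [hs3, hm3, List.append_assoc] using h1
            -- membership transfers and basic order facts
            have hfb : f ≤ b := hleast b
              (hperm1.mem_iff.2 (List.mem_cons_of_mem _ (hperm2.mem_iff.2 List.mem_cons_self)))
            have hm2_sub_m1 : ∀ z ∈ m2, z ∈ m1 := by
              rcases hcases2 with ⟨_, rfl⟩ | ⟨_, hme⟩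
              · exact fun z hz => hz
              · rw [hme]; exact fun z hz => List.mem_cons_of_mem _ hz
            have hb2_sub_b1 : ∀ z ∈ b2, z ∈ b1 := by
              rcases hcases2 with ⟨hbe, _⟩ | ⟨rfl, _⟩
              · rw [hbe]; exact fun z hz => List.mem_cons_of_mem _ hz
              · exact fun z hz => hz
            -- every element of m2 is ≤ 3·f  (from the cross condition or the 3·chain)
            have hm2_le_3f : ∀ z ∈ m2, z ≤ 3 * f := by
              intro z hz
              rcases hcases with ⟨hbe, rfl⟩ | ⟨_, hme⟩
              · exact hCross z (hm2_sub_m1 z hz) f (by rw [hbe]; exact List.mem_cons_self)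
              · rw [hme] at h3
                exact (List.pairwise_cons.1 h3).1 z (hm2_sub_m1 z hz)
            -- every element of m2 and of b2 is ≥ b
            have hb_le_m2 : ∀ z ∈ m2, b ≤ z := fun z hz =>
              hleast2 z (List.mem_append.2 (Or.inr (hm2_sub_m1 z hz)))
            have hb_le_b2 : ∀ z ∈ b2, b ≤ z := fun z hz =>
              hleast2 z (List.mem_append.2 (Or.inl (hb2_sub_b1 z hz)))
            -- the new invariant
            have hb2S : b2.Pairwise (· ≤ ·) := by
              rcases hcases2 with ⟨hbe, _⟩ | ⟨rfl, _⟩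
              · rw [hbe] at hb1S; exact (List.pairwise_cons.1 hb1S).2
              · exact hb1S
            have hm2S : m2.Pairwise (· ≤ ·) := by
              rcases hcases2 with ⟨_, rfl⟩ | ⟨_, hme⟩
              · exact hm1S
              · rw [hme] at hm1S; exact (List.pairwise_cons.1 hm1S).2
            have hm3S : m3.Pairwise (· ≤ ·) := by
              rw [hm3]
              refine List.pairwise_append.2 ⟨hm2S, by simp, ?_⟩
              intro z hz w hw
              simp at hw; subst hw
              have h1 : z ≤ 3 * f := hm2_le_3f z hz
              omega
            have hCross3 : ∀ z ∈ m3, ∀ x ∈ b2, z ≤ 3 * x := by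
              intro z hz x hx
              rw [hm3] at hz
              rcases List.mem_append.1 hz with hz | hz
              · -- old made value vs old base value
                have hzmade : z ∈ made := by
                  rcases hcases with ⟨_, rfl⟩ | ⟨_, hme⟩
                  · exact hm2_sub_m1 z hz
                  · rw [hme]; exact List.mem_cons_of_mem _ (hm2_sub_m1 z hz)
                have hxbase : x ∈ base := by
                  rcases hcases with ⟨hbe, _⟩ | ⟨rfl, _⟩
                  · rw [hbe]; exact List.mem_cons_of_mem _ (hb2_sub_b1 x hx)
                  · exact hb2_sub_b1 x hx
                exact hCross z hzmade x hxbase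
              · simp at hz; subst hz
                have h1 : b ≤ x := hb_le_b2 x hx
                omega
            have h33 : m3.Pairwise (fun i j => j ≤ 3 * i) := by
              rw [hm3]
              refine List.pairwise_append.2 ⟨?_, by simp, ?_⟩
              · rcases hcases with ⟨_, rfl⟩ | ⟨_, hme⟩
                · rcases hcases2 with ⟨_, rfl⟩ | ⟨_, hme2⟩
                  · exact h3
                  · rw [hme2] at h3; exact (List.pairwise_cons.1 h3).2
                · rw [hme] at h3
                  have h3' := (List.pairwise_cons.1 h3).2
                  rcases hcases2 with ⟨_, rfl⟩ | ⟨_, hme2⟩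
                  · exact h3'
                  · rw [hme2] at h3'; exact (List.pairwise_cons.1 h3').2
              · intro z hz w hw
                simp at hw; subst hw
                have h1 : b ≤ z := hb_le_m2 z hz
                omega
            -- the break test agrees on both sides
            have hlen : s3.length = b2.length + m3.length := by
              rw [hperm3.length_eq]; simp
            have hcond : (s3.length = 1 ∧ (PySem.List.min? s3 (fun x => x)).getD 0 < K)
                ↔ (b2.length + m3.length = 1 ∧ (frontB b2 m3).getD 0 < K) := by
              constructor
              · rintro ⟨h1, h2⟩
                have h1' : b2.length + m3.length = 1 := by omega
                have hb2nil : b2 = [] := by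
                  have : m3.length = m2.length + 1 := by simp [hm3]
                  have : b2.length = 0 := by omega
                  exact List.length_eq_zero_iff.1 this
                have hm2nil : m2 = [] := by
                  have : m2.length = 0 := by simp [hm3] at h1'; omega
                  exact List.length_eq_zero_iff.1 this
                subst hb2nil; subst hm2nil
                have hA : s3 = [v] := by
                  have := hperm3
                  simp [hm3] at this
                  exact this
                rw [hA, PySem.List.min?_id_cons] at h2
                simp [hm3, frontB]
                simpa using h2
              · rintro ⟨h1, h2⟩
                have hb2nil : b2 = [] := by
                  have : m3.length = m2.length + 1 := by simp [hm3]
                  have : b2.length = 0 := by omega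
                  exact List.length_eq_zero_iff.1 this
                have hm2nil : m2 = [] := by
                  have : m2.length = 0 := by simp [hm3] at h1; omega
                  exact List.length_eq_zero_iff.1 this
                subst hb2nil; subst hm2nil
                have hA : s3 = [v] := by
                  have := hperm3
                  simp [hm3] at this
                  exact this
                refine ⟨by omega, ?_⟩
                rw [hA, PySem.List.min?_id_cons]
                simp [hm3, frontB] at h2
                simpa using h2
            by_cases hc : b2.length + m3.length = 1 ∧ (frontB b2 m3).getD 0 < K
            · rw [if_pos (hcond.2 hc), if_pos hc]
            · rw [if_neg (fun h => hc (hcond.1 h)), if_neg hc]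
              exact ih s3 b2 m3 (ans + 1) hperm3 ⟨hb2S, hm3S, hCross3, h33⟩
        · simp [if_neg hfK]

-- ===== VERDICT (by name: the statement is the Claim_ definition above) =====
theorem solution_spec : Claim_equal_solution := by
  intro scoville K _ _
  unfold Spec_solution solution solution_alt
  exact loops_eq K _ scoville (PySem.List.sorted scoville (fun x => x)) [] 0
    (by simpa using (PySem.List.sorted_perm scoville (fun x => x) false).symm)
    ⟨PySem.List.sorted_pairwise scoville (fun x => x), by simp, by simp, by simp⟩
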